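-- pv_equiv track=rewrite | github.com/Kirayu173/NewsPulse | newspulse/workflow/selection/context_builder.py | _normalize_topics
-- ===== SOURCE A (Python) =====
-- from collections.abc import Iterable
-- from typing import Any
--
-- def _normalize_topics(value: Any) -> list[str]:
--     if isinstance(value, str):
--         parts = [segment.strip() for segment in value.split(",")]
--         return [part for part in parts if part]
--     if not isinstance(value, Iterable):
--         return []
--     topics: list[str] = []
--     for item in value:
--         text = str(item or "").strip()
--         if text:
--             topics.append(text)
--     return topics
-- ===== SOURCE B (Python) =====
-- from collections.abc import Iterable
--
-- def _normalize_topics(value):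
--     if isinstance(value, str):
--         items = value.split(",")
--     elif isinstance(value, Iterable):
--         items = list(value)
--     else:
--         return []
--     return _collect(items, 0, len(items))
--
-- def _collect(items, lo, hi):
--     """Divide and conquer: normalized topics of items[lo:hi]."""
--     if hi - lo == 0:
--         return []
--     if hi - lo == 1:
--         t = str(items[lo] or "").strip()
--         return [t] if t else []
--     mid = (lo + hi) // 2
--     return _collect(items, lo, mid) + _collect(items, mid, hi)
-- ===== Notes on version B (the rewrite author's own statement) =====
-- stated objective: alternative
-- what changed: A does a single forward pass appending to a mutable accumulator (with a split-then-filter comprehension pipeline for strings); B first materializes the items and then computes the result by divide and conquer on index ranges, recursively splitting [lo,hi) at the midpoint and concatenating the two halves' results, with singleton ranges as base cases.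
import Mathlib
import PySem

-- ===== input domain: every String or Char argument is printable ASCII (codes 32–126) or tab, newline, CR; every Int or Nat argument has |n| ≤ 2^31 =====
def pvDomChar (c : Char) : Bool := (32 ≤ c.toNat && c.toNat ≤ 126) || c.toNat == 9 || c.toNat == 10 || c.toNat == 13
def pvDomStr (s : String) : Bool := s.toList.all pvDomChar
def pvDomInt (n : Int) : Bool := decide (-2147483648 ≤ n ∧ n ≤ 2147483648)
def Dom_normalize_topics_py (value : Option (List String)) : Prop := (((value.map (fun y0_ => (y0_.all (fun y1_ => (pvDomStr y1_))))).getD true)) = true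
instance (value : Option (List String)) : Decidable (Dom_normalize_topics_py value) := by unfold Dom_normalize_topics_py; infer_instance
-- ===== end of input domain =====

-- B replaces A's single forward accumulator pass by midpoint divide-and-conquer over index ranges (alternative decomposition; return value only).

-- ===== PORT A =====
-- A (iterable branch, the one the type admits): explicit accumulator loop; 'item or ""' kept as an if.
def normalize_topics_py (value : Option (List String)) : List String :=
  match value with
  | none => []
  | some xs =>
    xs.foldl (fun topics item =>
      let text := PySem.Str.strip (if item = "" then "" else item)
      if text ≠ "" then topics ++ [text] else topics) []

-- ===== PORT B =====
-- B's _collect: divide and conquer on the index range [lo, hi).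
-- (indices are Nat: in Source B lo, hi are between 0 and len(items); the fuel argument only makes the
--  recursion total — fuel ≥ hi - lo always holds at the calls, so the fuel-0 branch is unreachable;
--  items[lo]? is items[lo], the none branch unreachable since lo < hi ≤ items.length)
def pvCollect (items : List String) : Nat → Nat → Nat → List String
  | 0, _, _ => []
  | fuel + 1, lo, hi =>
    if hi - lo = 0 then []
    else if hi - lo = 1 then
      match items[lo]? with
      | none => []
      | some x =>
        let t := PySem.Str.strip (if x = "" then "" else x)
        if t ≠ "" then [t] else []
    else
      let mid := (lo + hi) / 2
      pvCollect items fuel lo mid ++ pvCollect items fuel mid hi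

def normalize_topics_py_alt (value : Option (List String)) : List String :=
  match value with
  | none => []
  | some items => pvCollect items items.length 0 items.length

-- ===== PRECONDITION & SPEC =====
def Spec_normalize_topics_py (value : Option (List String)) (out : List String) : Prop := out = normalize_topics_py_alt value
instance (value : Option (List String)) (out : List String) : Decidable (Spec_normalize_topics_py value out) := by unfold Spec_normalize_topics_py; infer_instance

-- ===== CLAIM (what is proved, stated in full; the proofs are below) =====
def Claim_equal_normalize_topics_py : Prop := ∀ (value : Option (List String)), Dom_normalize_topics_py value → Spec_normalize_topics_py value (normalize_topics_py value)

-- ===== LEMMAS AND PROOFS =====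

-- the shared per-item normalization, as an Option for filterMap
def pvNorm (x : String) : Option String :=
  let t := PySem.Str.strip (if x = "" then "" else x)
  if t ≠ "" then some t else none

lemma fold_eq_filterMap (xs : List String) (acc : List String) :
    xs.foldl (fun topics item =>
      let text := PySem.Str.strip (if item = "" then "" else item)
      if text ≠ "" then topics ++ [text] else topics) acc
    = acc ++ xs.filterMap pvNorm := by
  induction xs generalizing acc with
  | nil => simp
  | cons x xs ih =>
    rw [List.foldl_cons, ih, List.filterMap_cons]
    by_cases h : PySem.Str.strip (if x = "" then "" else x) = "" <;>
      simp [pvNorm, h]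

lemma collect_eq_filterMap_slice (items : List String) :
    ∀ (fuel lo hi : Nat), hi - lo ≤ fuel → hi ≤ items.length →
      pvCollect items fuel lo hi = ((items.drop lo).take (hi - lo)).filterMap pvNorm := by
  intro fuel
  induction fuel with
  | zero =>
    intro lo hi hle _
    simp [pvCollect, Nat.le_zero.mp hle]
  | succ n ih =>
    intro lo hi hle hlen
    rw [pvCollect]
    by_cases h0 : hi - lo = 0
    · simp [h0]
    · by_cases h1 : hi - lo = 1
      · have hlt : lo < items.length := by omega
        rw [List.drop_eq_getElem_cons hlt]
        simp only [h0, h1, if_true, List.getElem?_eq_getElem hlt,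
          List.take_succ_cons, List.take_zero, List.filterMap_cons, List.filterMap_nil]
        by_cases h : PySem.Str.strip (if items[lo] = "" then "" else items[lo]) = "" <;>
          simp [pvNorm, h]
      · simp only [h0, h1, if_false]
        have hmid1 : (lo + hi) / 2 - lo ≤ n := by omega
        have hmid2 : hi - (lo + hi) / 2 ≤ n := by omega
        rw [ih lo ((lo + hi) / 2) hmid1 (by omega), ih ((lo + hi) / 2) hi hmid2 hlen]
        rw [← List.filterMap_append]
        congr 1
        have hdrop : items.drop ((lo + hi) / 2) = (items.drop lo).drop ((lo + hi) / 2 - lo) := by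
          rw [List.drop_drop]
          congr 1
          omega
        rw [hdrop]
        have hsum : hi - lo = ((lo + hi) / 2 - lo) + (hi - (lo + hi) / 2) := by omega
        rw [hsum, List.take_add]

-- ===== VERDICT (by name: the statement is the Claim_ definition above) =====
theorem normalize_topics_py_spec : Claim_equal_normalize_topics_py := by
  intro value _
  cases value with
  | none => rfl
  | some xs =>
    simp only [Spec_normalize_topics_py, normalize_topics_py, normalize_topics_py_alt]
    rw [fold_eq_filterMap, collect_eq_filterMap_slice xs xs.length 0 xs.length (by omega) le_rfl]
    simp
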